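-- pv_equiv track=rewrite | github.com/davidcwang/1337c0d3 | 301_Remove_Invalid_Parentheses/solution.py | _more_close_parens
-- ===== SOURCE A (Python) =====
-- def _more_close_parens(s):
--     count = 0
--     for c in s:
--
--         if c == ')':
--             if count == 0:
--                 return True
--             count -= 1
--
--         elif c == '(':
--             count += 1
--
--     return False
-- ===== SOURCE B (Python) =====
-- def _scan(t):
--     # (total balance, minimum prefix balance) of t, by divide and conquer
--     if len(t) == 0:
--         return (0, 0)
--     if len(t) == 1:
--         w = 1 if t == '(' else -1 if t == ')' else 0
--         return (w, min(w, 0))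
--     mid = len(t) // 2
--     b1, m1 = _scan(t[:mid])
--     b2, m2 = _scan(t[mid:])
--     return (b1 + b2, min(m1, b1 + m2))
--
-- def _more_close_parens(s):
--     _balance, min_prefix = _scan(s)
--     return min_prefix < 0
-- ===== Notes on version B (the rewrite author's own statement) =====
-- stated objective: alternative
-- what changed: Replaces A's left-to-right counter with early return by a divide-and-conquer recursion that splits the string in half and combines (total balance, minimum prefix balance) pairs, answering min-prefix < 0.
import Mathlib
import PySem

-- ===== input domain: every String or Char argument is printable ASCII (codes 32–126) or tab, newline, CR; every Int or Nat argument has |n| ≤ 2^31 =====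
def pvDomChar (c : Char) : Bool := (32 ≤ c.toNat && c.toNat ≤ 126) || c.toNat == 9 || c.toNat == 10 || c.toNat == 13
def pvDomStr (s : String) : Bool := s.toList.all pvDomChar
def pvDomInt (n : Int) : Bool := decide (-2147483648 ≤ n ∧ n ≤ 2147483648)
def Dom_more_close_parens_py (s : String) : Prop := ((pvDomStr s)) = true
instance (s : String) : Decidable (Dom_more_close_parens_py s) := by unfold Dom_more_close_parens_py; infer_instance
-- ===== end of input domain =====

-- B replaces A's sequential counter with early return by a divide-and-conquer
-- recursion combining (total balance, minimum prefix balance) pairs (objective: alternative).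

-- ===== PORT A =====
-- loop over the characters with counter `count`; early return becomes the recursion result
def mcpA : List Char → Int → Bool
  | [], _ => false
  | c :: cs, count =>
    if c = ')' then
      if count = 0 then true else mcpA cs (count - 1)
    else if c = '(' then mcpA cs (count + 1)
    else mcpA cs count

def more_close_parens_py (s : String) : Bool := mcpA s.toList 0

-- ===== PORT B =====
-- _scan: (total balance, minimum prefix balance) of t, by divide and conquer
def mcpScan : List Char → Int × Int
  | [] => (0, 0)
  | [c] =>
    let w : Int := if c = '(' then 1 else if c = ')' then -1 else 0
    (w, min w 0)
  | c1 :: c2 :: rest =>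
    let mid := (c1 :: c2 :: rest).length / 2
    let p := mcpScan ((c1 :: c2 :: rest).take mid)
    let q := mcpScan ((c1 :: c2 :: rest).drop mid)
    (p.1 + q.1, min p.2 (p.1 + q.2))
termination_by cs => cs.length
decreasing_by
  · simp [List.length_take]; omega
  · simp; omega

def more_close_parens_py_alt (s : String) : Bool :=
  decide ((mcpScan s.toList).2 < 0)

-- ===== PRECONDITION & SPEC =====
def Spec_more_close_parens_py (s : String) (out : Bool) : Prop := out = more_close_parens_py_alt s
instance (s : String) (out : Bool) : Decidable (Spec_more_close_parens_py s out) := by unfold Spec_more_close_parens_py; infer_instance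

-- ===== CLAIM (what is proved, stated in full; the proofs are below) =====
def Claim_equal_more_close_parens_py : Prop := ∀ (s : String), Dom_more_close_parens_py s → Spec_more_close_parens_py s (more_close_parens_py s)

-- ===== LEMMAS AND PROOFS =====
-- reference semantics: total balance and minimum prefix balance (both include the empty prefix)
def mcpW (c : Char) : Int := if c = '(' then 1 else if c = ')' then -1 else 0

def mcpBal : List Char → Int
  | [] => 0
  | c :: cs => mcpW c + mcpBal cs

def mcpMin : List Char → Int
  | [] => 0
  | c :: cs => min 0 (mcpW c + mcpMin cs)

theorem mcpMin_nonpos (cs : List Char) : mcpMin cs ≤ 0 := by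
  cases cs with
  | nil => simp [mcpMin]
  | cons c cs => simp [mcpMin]

theorem mcpBal_append (l r : List Char) : mcpBal (l ++ r) = mcpBal l + mcpBal r := by
  induction l with
  | nil => simp [mcpBal]
  | cons c l ih => simp [mcpBal, ih]; ring

theorem mcpMin_append (l r : List Char) :
    mcpMin (l ++ r) = min (mcpMin l) (mcpBal l + mcpMin r) := by
  induction l with
  | nil =>
    have := mcpMin_nonpos r
    simp [mcpMin, mcpBal]; omega
  | cons c l ih =>
    simp [mcpMin, mcpBal, ih]
    omega

theorem mcpScan_eq (cs : List Char) : mcpScan cs = (mcpBal cs, mcpMin cs) := by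
  induction cs using mcpScan.induct with
  | case1 => simp [mcpScan, mcpBal, mcpMin]
  | case2 c => simp [mcpScan, mcpBal, mcpMin, mcpW, min_comm]
  | case3 c1 c2 rest mid ih1 ih2 =>
    have hmid : mid = (c1 :: c2 :: rest).length / 2 := rfl
    rw [hmid] at ih1 ih2
    have h := List.take_append_drop ((c1 :: c2 :: rest).length / 2) (c1 :: c2 :: rest)
    simp only [mcpScan, ih1, ih2]
    rw [← mcpBal_append, ← mcpMin_append, h]

theorem mcpA_eq (cs : List Char) : ∀ count : Int, 0 ≤ count →
    mcpA cs count = decide (count + mcpMin cs < 0) := by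
  induction cs with
  | nil => intro count hc; simp [mcpA, mcpMin]; omega
  | cons c cs ih =>
    intro count hc
    have hm := mcpMin_nonpos cs
    by_cases hcp : c = ')'
    · by_cases h0 : count = 0
      · simp [mcpA, mcpMin, mcpW, hcp, h0]
        omega
      · rw [mcpA]
        simp only [hcp, if_true, h0, if_false, ih _ (by omega : (0:Int) ≤ count - 1)]
        simp [mcpMin, mcpW]
        omega
    · by_cases hop : c = '('
      · rw [mcpA]
        simp only [hop, if_true, ih _ (by omega : (0:Int) ≤ count + 1)]
        simp [mcpMin, mcpW]
        omega
      · rw [mcpA]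
        simp only [hcp, hop, if_false, ih _ hc]
        simp [mcpMin, mcpW, hcp, hop]
        omega

-- ===== VERDICT (by name: the statement is the Claim_ definition above) =====
theorem more_close_parens_py_spec : Claim_equal_more_close_parens_py := by
  intro s _
  unfold Spec_more_close_parens_py more_close_parens_py more_close_parens_py_alt
  rw [mcpScan_eq, mcpA_eq s.toList 0 le_rfl]
  simp
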